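-- pv_equiv track=rewrite | github.com/umairozu/DcTS | Demo2.py | get_output_base
-- ===== SOURCE A (Python) =====
-- from collections import Counter
--
-- def get_output_base(data):
--     seqs = [item for item in data]
--     majority = []
--
--     for chars in zip(*seqs):
--         counts = Counter(chars)
--         max_count = max(counts.values())
--
--         winners = []
--         for char, count in counts.items():
--             winners.append(char)
--
--         if len(winners) > 1 and ('X' or 'A' or 'G' or 'C' or 'T') in winners:
--             winners.remove('X')
--         majority.append(winners[0])
--     return "".join(majority)
-- ===== SOURCE B (Python) =====
-- def get_output_base(data):
--     # Per column: the first character that is not 'X' wins; if the whole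
--     # column is 'X', column[0] (an 'X') is used.
--     seqs = list(data)
--     out = []
--     for col in zip(*seqs):
--         out.append(next((c for c in col if c != 'X'), col[0]))
--     return "".join(out)
-- ===== Notes on version B (the rewrite author's own statement) =====
-- stated objective: simpler
-- what changed: A builds a Counter, an explicit distinct-winners list and a conditional remove('X') per column; B replaces all of that with a single direct scan taking the first non-'X' character of each column (falling back to col[0] when the column is all 'X').
import Mathlib
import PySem

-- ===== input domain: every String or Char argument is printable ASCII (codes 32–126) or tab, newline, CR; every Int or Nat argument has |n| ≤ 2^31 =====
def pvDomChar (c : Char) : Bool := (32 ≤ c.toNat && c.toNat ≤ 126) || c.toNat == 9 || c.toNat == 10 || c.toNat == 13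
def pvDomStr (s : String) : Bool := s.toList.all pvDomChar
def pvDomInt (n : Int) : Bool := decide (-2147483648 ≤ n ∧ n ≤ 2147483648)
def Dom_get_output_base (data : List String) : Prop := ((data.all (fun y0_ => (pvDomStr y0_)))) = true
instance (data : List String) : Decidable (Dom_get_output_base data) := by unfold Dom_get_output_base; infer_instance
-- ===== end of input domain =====

-- B replaces A's per-column Counter / distinct-list / remove('X') machinery by a direct
-- first-non-'X' scan of each column (objective: simpler).

-- shared helper: zip(*seqs) over strings-as-char-lists — columns up to the shortest string
def pvZipCols (xs : List (List Char)) : List (List Char) :=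
  match xs with
  | [] => []
  | h :: t =>
    let n := t.foldl (fun m s => min m s.length) h.length
    (List.range n).map (fun i => (h :: t).map (fun s => s.getD i ' '))

-- ===== PORT A =====
def get_output_base (data : List String) : String :=
  let seqs := data.map (fun item => item.toList)   -- seqs = [item for item in data]
  let majority := (pvZipCols seqs).foldl (fun (majority : List Char) (chars : List Char) =>
    let counts := PySem.Dict.counter chars                          -- Counter(chars)
    let _max_count := PySem.List.max? counts.values (fun v => v)                 -- max(counts.values()); chars ≠ [] so it is some _
    let winners := counts.items.foldl (fun ws p => ws ++ [p.1]) ([] : List Char)  -- for char, count in counts.items(): winners.append(char)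
    -- Python's ('X' or 'A' or 'G' or 'C' or 'T') evaluates to 'X'
    let winners := if 1 < winners.length ∧ winners.contains 'X'
      then (PySem.List.remove? winners 'X').getD winners            -- winners.remove('X'); succeeds, membership just checked
      else winners
    majority ++ [PySem.List.pyGetD winners 0 ' ']) ([] : List Char) -- winners[0]; winners ≠ [] since chars ≠ []
  String.mk majority

-- ===== PORT B =====
def get_output_base_alt (data : List String) : String :=
  let seqs := data.map (fun item => item.toList)    -- seqs = list(data)
  String.mk ((pvZipCols seqs).map (fun col =>
    (col.find? (fun c => c != 'X')).getD (PySem.List.pyGetD col 0 ' ')))  -- next((c for c in col if c != 'X'), col[0])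

-- ===== PRECONDITION & SPEC =====
def Spec_get_output_base (data : List String) (out : String) : Prop := out = get_output_base_alt data
instance (data : List String) (out : String) : Decidable (Spec_get_output_base data out) := by unfold Spec_get_output_base; infer_instance

-- ===== CLAIM (what is proved, stated in full; the proofs are below) =====
def Claim_equal_get_output_base : Prop := ∀ (data : List String), Dom_get_output_base data → Spec_get_output_base data (get_output_base data)

-- ===== LEMMAS AND PROOFS =====

-- dropping all copies of an element the predicate rejects does not change find?
lemma find?_discard (p : Char → Bool) (x : Char) (hx : p x = false) :
    ∀ s : List Char, (PySem.Set.discard s x).find? p = s.find? p := by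
  intro s
  induction s with
  | nil => rfl
  | cons a s ih =>
    by_cases hax : a = x
    · subst hax
      have h1 : PySem.Set.discard (a :: s) a = PySem.Set.discard s a := by
        simp [PySem.Set.discard]
      rw [h1, ih, List.find?_cons_of_neg (by simp [hx])]
    · have h1 : PySem.Set.discard (a :: s) x = a :: PySem.Set.discard s x := by
        simp [PySem.Set.discard, hax]
      rw [h1]
      by_cases hpa : p a
      · rw [List.find?_cons_of_pos hpa, List.find?_cons_of_pos hpa]
      · simp only [Bool.not_eq_true] at hpa
        rw [List.find?_cons_of_neg (by simp [hpa]), List.find?_cons_of_neg (by simp [hpa]), ih]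

-- Set.ofList keeps first occurrences in order, so find? goes through it
lemma find?_ofList (p : Char → Bool) :
    ∀ cs : List Char, (PySem.Set.ofList cs).find? p = cs.find? p := by
  intro cs
  induction cs with
  | nil => rfl
  | cons c cs ih =>
    rw [PySem.Set.ofList_cons]
    by_cases hpc : p c
    · rw [List.find?_cons_of_pos hpc, List.find?_cons_of_pos hpc]
    · simp only [Bool.not_eq_true] at hpc
      rw [List.find?_cons_of_neg (by simp [hpc]), List.find?_cons_of_neg (by simp [hpc]),
        find?_discard p c hpc, ih]

-- the two ports agree on one (nonempty) column
lemma col_eq (c : Char) (cs : List Char) :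
    (let winners := (PySem.Dict.counter (c :: cs)).items.map Prod.fst
     PySem.List.pyGetD
       (if 1 < winners.length ∧ winners.contains 'X'
        then (PySem.List.remove? winners 'X').getD winners
        else winners) 0 ' ')
    = ((c :: cs).find? (fun d => d != 'X')).getD (PySem.List.pyGetD (c :: cs) 0 ' ') := by
  have hw : (PySem.Dict.counter (c :: cs)).items.map Prod.fst
      = c :: PySem.Set.discard (PySem.Set.ofList cs) c := by
    rw [← PySem.Set.ofList_cons]
    exact PySem.Dict.keys_counter (c :: cs)
  simp only [hw]
  have hget : ∀ (x : Char) (xs : List Char), PySem.List.pyGetD (x :: xs) 0 ' ' = x := by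
    intro x xs; simp [pysem]
  rw [hget c cs]
  by_cases hc : c = 'X'
  · subst hc
    have hpX : ('X' != 'X') = false := by decide
    rw [List.find?_cons_of_neg (by simp)]
    cases hr : PySem.Set.discard (PySem.Set.ofList cs) 'X' with
    | nil =>
      have hcond : ¬ (1 < (['X'] : List Char).length ∧ (['X'] : List Char).contains 'X') := by decide
      rw [if_neg hcond, hget]
      have : cs.find? (fun d => d != 'X') = none := by
        rw [← find?_ofList, ← find?_discard (fun d => d != 'X') 'X' hpX, hr]
        rfl
      rw [this]
      rfl
    | cons y r' =>
      rw [if_pos ⟨by simp, by simp⟩]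
      rw [PySem.List.remove?_cons_self, Option.getD_some, hget]
      have hy : (y != 'X') = true := by
        have hmem : y ∈ PySem.Set.discard (PySem.Set.ofList cs) 'X' := by
          rw [hr]; exact List.mem_cons_self
        have := (List.mem_filter.mp hmem).2
        simpa using this
      have : cs.find? (fun d => d != 'X') = some y := by
        rw [← find?_ofList, ← find?_discard (fun d => d != 'X') 'X' hpX, hr,
          List.find?_cons_of_pos (p := fun d => d != 'X') hy]
      rw [this, Option.getD_some]
  · have hpc : (c != 'X') = true := by simpa using hc
    rw [List.find?_cons_of_pos (p := fun d => d != 'X') hpc, Option.getD_some]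
    by_cases hcond : (1 < (c :: PySem.Set.discard (PySem.Set.ofList cs) c).length ∧
        (c :: PySem.Set.discard (PySem.Set.ofList cs) c).contains 'X')
    · rw [if_pos hcond]
      have hXr : 'X' ∈ PySem.Set.discard (PySem.Set.ofList cs) c := by
        have := hcond.2
        simp only [List.contains_eq_mem, List.mem_cons, decide_eq_true_eq] at this
        rcases this with h | h
        · exact absurd h.symm hc
        · exact h
      rw [PySem.List.remove?_cons_of_ne _ hc,
        PySem.List.remove?_eq_some_erase _ 'X' hXr]
      simp [hget]
    · rw [if_neg hcond, hget]

-- every column produced by pvZipCols is nonempty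
lemma pvZipCols_ne_nil (xs : List (List Char)) :
    ∀ col ∈ pvZipCols xs, ∃ c cs, col = c :: cs := by
  intro col hcol
  match xs with
  | [] => simp [pvZipCols] at hcol
  | h :: t =>
    simp only [pvZipCols, List.mem_map] at hcol
    obtain ⟨i, _, rfl⟩ := hcol
    exact ⟨h.getD i ' ', t.map (fun s => s.getD i ' '), rfl⟩

-- ===== VERDICT (by name: the statement is the Claim_ definition above) =====
theorem get_output_base_spec : Claim_equal_get_output_base := by
  intro data _
  show get_output_base data = get_output_base_alt data
  simp only [get_output_base, get_output_base_alt,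
    PySem.List.foldl_append_singleton_eq_map, List.nil_append]
  congr 1
  apply List.map_congr_left
  intro col hcol
  obtain ⟨c, cs, rfl⟩ := pvZipCols_ne_nil _ col hcol
  exact col_eq c cs
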